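-- pv_equiv track=rewrite | github.com/LeoZedek/adventofcode | 2023/J13/solution2.py | find_mirror_row
-- ===== SOURCE A (Python) =====
-- def find_mirror_row(pattern):
--
-- 	result = []
--
-- 	for i in range(1, len(pattern)):
--
-- 		match = True
--
-- 		up_row_index = i - 1
-- 		down_row_index = i
--
-- 		while down_row_index < len(pattern) and up_row_index >= 0 and match:
--
-- 			if pattern[up_row_index] != pattern[down_row_index]:
-- 				match = False
--
-- 			up_row_index -= 1
-- 			down_row_index += 1
--
-- 		if match:
-- 			result.append(i)
--
-- 	return result
-- ===== SOURCE B (Python) =====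
-- def find_mirror_row(pattern):
--     n = len(pattern)
--     result = []
--     for i in range(1, n):
--         k = min(i, n - i)
--         if pattern[i - k:i] == pattern[i:i + k][::-1]:
--             result.append(i)
--     return result
-- ===== Notes on version B (the rewrite author's own statement) =====
-- stated objective: faster
-- what changed: Replaces the hand-rolled two-pointer while-loop with a mutable match flag (which keeps scanning to the boundary even after a mismatch) by a single slice comparison per axis: the block above the axis is compared to the reversed block below it, short-circuiting at the first mismatch and running the comparison in C.
import Mathlib
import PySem

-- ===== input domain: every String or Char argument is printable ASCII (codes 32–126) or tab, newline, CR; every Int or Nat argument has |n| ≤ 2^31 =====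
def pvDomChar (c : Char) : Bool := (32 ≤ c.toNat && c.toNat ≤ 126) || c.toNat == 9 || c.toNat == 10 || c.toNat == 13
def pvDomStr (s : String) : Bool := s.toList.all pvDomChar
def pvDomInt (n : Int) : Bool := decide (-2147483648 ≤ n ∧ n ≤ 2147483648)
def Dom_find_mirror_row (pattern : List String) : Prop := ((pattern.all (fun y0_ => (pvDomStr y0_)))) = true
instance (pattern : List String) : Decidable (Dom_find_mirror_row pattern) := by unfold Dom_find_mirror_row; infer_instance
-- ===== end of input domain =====

-- B replaces A's two-pointer while-loop (mutable match flag, keeps scanning after a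
-- mismatch) by one slice comparison per candidate axis: reversed block above == block below.

-- ===== PORT A =====
-- the inner 'while down < len and up >= 0 and match' loop of A
def mirrorLoop (pattern : List String) (up down : Int) (m : Bool) : Bool :=
  if h : down < (pattern.length : Int) ∧ 0 ≤ up ∧ m = true then
    mirrorLoop pattern (up - 1) (down + 1)
      (if PySem.List.pyGetD pattern up "" ≠ PySem.List.pyGetD pattern down "" then false else m)
  else m
termination_by ((pattern.length : Int) - down).toNat
decreasing_by omega

def find_mirror_row (pattern : List String) : List Int :=
  (PySem.List.pyRange 1 (pattern.length : Int) 1).foldl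
    (fun result i => if mirrorLoop pattern (i - 1) i true then result ++ [i] else result) []

-- ===== PORT B =====
def find_mirror_row_alt (pattern : List String) : List Int :=
  let n : Int := (pattern.length : Int)
  (PySem.List.pyRange 1 n 1).foldl
    (fun result i =>
      let k := min i (n - i)
      -- pattern[i:i+k][::-1] ported as .reverse (PySem.List.slice?_none_none_neg_one)
      if PySem.List.slice pattern (some (i - k)) (some i) =
         (PySem.List.slice pattern (some i) (some (i + k))).reverse
      then result ++ [i] else result) []

-- ===== PRECONDITION & SPEC =====
def Spec_find_mirror_row (pattern : List String) (out : List Int) : Prop := out = find_mirror_row_alt pattern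
instance (pattern : List String) (out : List Int) : Decidable (Spec_find_mirror_row pattern out) := by unfold Spec_find_mirror_row; infer_instance

-- ===== CLAIM (what is proved, stated in full; the proofs are below) =====
def Claim_equal_find_mirror_row : Prop := ∀ (pattern : List String), Dom_find_mirror_row pattern → Spec_find_mirror_row pattern (find_mirror_row pattern)

-- ===== LEMMAS AND PROOFS =====

-- the shared mirror predicate, indexed over naturals
def Mirror (p : List String) (t k : Nat) : Prop :=
  ∀ j : Nat, j < k → p.getD (t - 1 - j) "" = p.getD (t + j) ""

lemma mirrorLoop_false (p : List String) (u d : Int) : mirrorLoop p u d false = false := by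
  rw [mirrorLoop]; simp

lemma mirrorLoop_iff (p : List String) :
    ∀ (fuel : Nat) (u d : Int), 0 ≤ d → ((p.length : Int) - d).toNat ≤ fuel →
    (mirrorLoop p u d true = true ↔
      ∀ j : Nat, (j : Int) ≤ u → d + (j : Int) < (p.length : Int) →
        p.getD (u - (j : Int)).toNat "" = p.getD (d + (j : Int)).toNat "") := by
  intro fuel
  induction fuel with
  | zero =>
      intro u d hd hf
      rw [mirrorLoop]
      have hlen : (p.length : Int) ≤ d := by omega
      rw [dif_neg (by omega)]
      simp only [true_iff]
      intro j _ hj; omega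
  | succ fuel ih =>
      intro u d hd hf
      by_cases hc : d < (p.length : Int) ∧ 0 ≤ u
      · rw [mirrorLoop, dif_pos ⟨hc.1, hc.2, rfl⟩]
        have hget : ∀ x : Int, 0 ≤ x → PySem.List.pyGetD p x "" = p.getD x.toNat "" := by
          intro x hx
          obtain ⟨m, rfl⟩ := Int.eq_ofNat_of_zero_le hx
          simp [PySem.List.pyGetD_natCast]
        by_cases heq : PySem.List.pyGetD p u "" = PySem.List.pyGetD p d ""
        · rw [if_neg (by simpa using heq)]
          rw [ih (u - 1) (d + 1) (by omega) (by omega)]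
          constructor
          · intro h j hju hjd
            rcases j with _ | j'
            · simp only [Nat.cast_zero, sub_zero, add_zero]
              rw [← hget u hc.2, ← hget d hd]; exact heq
            · have := h j' (by push_cast at hju ⊢; omega) (by push_cast at hjd ⊢; omega)
              have e1 : (u - 1 - (j' : Int)) = u - ((j' + 1 : Nat) : Int) := by push_cast; ring
              have e2 : (d + 1 + (j' : Int)) = d + ((j' + 1 : Nat) : Int) := by push_cast; ring
              rwa [e1, e2] at this
          · intro h j hju hjd
            have := h (j + 1) (by push_cast; omega) (by push_cast; omega)
            have e1 : (u - ((j + 1 : Nat) : Int)) = u - 1 - (j : Int) := by push_cast; ring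
            have e2 : (d + ((j + 1 : Nat) : Int)) = d + 1 + (j : Int) := by push_cast; ring
            rwa [e1, e2] at this
        · rw [if_pos heq, mirrorLoop_false]
          simp only [Bool.false_eq_true, false_iff]
          intro h
          exact heq (((hget u hc.2).trans (by simpa using h 0 (by omega) (by omega))).trans
            (hget d hd).symm)
      · rw [mirrorLoop, dif_neg (by tauto)]
        simp only [true_iff]
        intro j hju hjd
        omega

lemma loop_char (p : List String) (i : Int) (h1 : 1 ≤ i) (h2 : i < (p.length : Int)) :
    (mirrorLoop p (i - 1) i true = true) ↔
      Mirror p i.toNat (min i.toNat (p.length - i.toNat)) := by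
  rw [mirrorLoop_iff p ((p.length : Int) - i).toNat (i - 1) i (by omega) (by omega)]
  constructor
  · intro h j hj
    have := h j (by omega) (by omega)
    have e1 : (i - 1 - (j : Int)).toNat = i.toNat - 1 - j := by omega
    have e2 : (i + (j : Int)).toNat = i.toNat + j := by omega
    rwa [e1, e2] at this
  · intro h j hj1 hj2
    have := h j (by omega)
    have e1 : (i - 1 - (j : Int)).toNat = i.toNat - 1 - j := by omega
    have e2 : (i + (j : Int)).toNat = i.toNat + j := by omega
    rw [e1, e2]
    exact this

lemma slice_char (p : List String) (i : Int) (h1 : 1 ≤ i) (h2 : i < (p.length : Int)) :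
    (PySem.List.slice p (some (i - min i ((p.length : Int) - i))) (some i) =
      (PySem.List.slice p (some i) (some (i + min i ((p.length : Int) - i)))).reverse) ↔
      Mirror p i.toNat (min i.toNat (p.length - i.toNat)) := by
  have hk : min i ((p.length : Int) - i) = ((min i.toNat (p.length - i.toNat) : Nat) : Int) := by
    omega
  rw [hk]
  generalize hkg : min i.toNat (p.length - i.toNat) = k at *
  have hkt : k ≤ i.toNat := by omega
  have hkl : i.toNat + k ≤ p.length := by omega
  rw [PySem.List.slice_toNat p (show (0:Int) ≤ i - (k : Int) by omega) (show (0:Int) ≤ i by omega),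
      PySem.List.slice_toNat p (show (0:Int) ≤ i by omega) (show (0:Int) ≤ i + (k : Int) by omega)]
  have eA : List.take (i.toNat - (i - (k : Int)).toNat) (List.drop (i - (k : Int)).toNat p) =
      List.take k (List.drop (i.toNat - k) p) := by
    rw [show (i - (k : Int)).toNat = i.toNat - k by omega,
        show i.toNat - (i.toNat - k) = k by omega]
  have eB : List.take ((i + (k : Int)).toNat - i.toNat) (List.drop i.toNat p) =
      List.take k (List.drop i.toNat p) := by
    rw [show (i + (k : Int)).toNat - i.toNat = k by omega]
  rw [eA, eB]
  have len1 : (List.take k (List.drop (i.toNat - k) p)).length = k := by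
    simp only [List.length_take, List.length_drop]; omega
  have len2 : (List.take k (List.drop i.toNat p)).length = k := by
    simp only [List.length_take, List.length_drop]; omega
  -- getD of a (take k ∘ drop a) window
  have gA : ∀ (a j : Nat), a + k ≤ p.length → j < k →
      (List.take k (List.drop a p)).getD j "" = p.getD (a + j) "" := by
    intro a j ha hj
    rw [List.getD_eq_getElem _ "" (by simp only [List.length_take, List.length_drop]; omega),
        List.getElem_take, List.getElem_drop, List.getD_eq_getElem p "" (by omega)]
  have gR : ∀ (l : List String) (j : Nat), j < l.length →
      l.reverse.getD j "" = l.getD (l.length - 1 - j) "" := by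
    intro l j hj
    rw [List.getD_eq_getElem _ "" (by simpa using hj), List.getElem_reverse,
        List.getD_eq_getElem _ "" (by omega)]
  constructor
  · intro h j' hj'
    have hg := congrArg (fun l => l.getD (k - 1 - j') "") h
    simp only at hg
    rw [gA _ _ (by omega) (by omega), gR _ _ (by rw [len2]; omega), len2,
        gA _ _ (by omega) (by omega)] at hg
    rw [show i.toNat - 1 - j' = i.toNat - k + (k - 1 - j') by omega,
        show i.toNat + j' = i.toNat + (k - 1 - (k - 1 - j')) by omega]
    exact hg
  · intro h
    apply List.ext_getElem (by rw [len1, List.length_reverse, len2])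
    intro j hja hjb
    have hjk : j < k := by rw [len1] at hja; exact hja
    have e1 := (List.getD_eq_getElem (List.take k (List.drop (i.toNat - k) p)) "" hja).symm
    have e2 := (List.getD_eq_getElem (List.take k (List.drop i.toNat p)).reverse "" hjb).symm
    rw [e1, e2, gA _ _ (by omega) hjk, gR _ _ (by rw [len2]; omega), len2,
        gA _ _ (by omega) (by omega)]
    have := h (k - 1 - j) (by omega)
    rw [show i.toNat - k + j = i.toNat - 1 - (k - 1 - j) by omega]
    exact this

lemma foldl_if_congr (P Q : Int → Prop) [DecidablePred P] [DecidablePred Q] :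
    ∀ (l : List Int) (acc : List Int), (∀ i ∈ l, P i ↔ Q i) →
    l.foldl (fun r i => if P i then r ++ [i] else r) acc =
    l.foldl (fun r i => if Q i then r ++ [i] else r) acc := by
  intro l
  induction l with
  | nil => intro acc _; rfl
  | cons a l ih =>
      intro acc h
      simp only [List.foldl_cons]
      rw [if_congr (h a (by simp)) rfl rfl]
      exact ih _ (fun i hi => h i (by simp [hi]))

-- ===== VERDICT (by name: the statement is the Claim_ definition above) =====
theorem find_mirror_row_spec : Claim_equal_find_mirror_row := by
  intro pattern _
  unfold Spec_find_mirror_row find_mirror_row find_mirror_row_alt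
  refine foldl_if_congr _ _ _ _ ?_
  intro i hi
  rw [PySem.List.mem_pyRange_one] at hi
  rw [loop_char pattern i hi.1 hi.2, slice_char pattern i hi.1 hi.2]
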